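-- pv_equiv track=rewrite | github.com/GTGowtham/python_problem_solving | basic_logic/count_of_first_last_letter_same.py | str_check
-- ===== SOURCE A (Python) =====
-- def str_check(str1):
--     str1=str1.lower()
--     separators=[',','.','!','?',' ']
--     words=[]
--     temp=""
--     count=0
--     for ch in str1:
--         if ch not in separators:
--             temp+=ch
--         else:
--             if temp=="":
--                 pass
--             else:
--                 words.append(temp)
--                 temp=""
--     if temp!="":
--         words.append(temp)
--
--     for word in words:
--         n=len(word)-1
--         if(word[0]==word[n]):
--             count+=1
--     return count
-- ===== SOURCE B (Python) =====
-- def str_check(str1):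
--     count = 0
--     first = last = None
--     for ch in str1.lower():
--         if ch in ",.!? ":
--             if first is not None:
--                 if first == last:
--                     count += 1
--                 first = None
--         else:
--             if first is None:
--                 first = ch
--             last = ch
--     if first is not None and first == last:
--         count += 1
--     return count
-- ===== Notes on version B (the rewrite author's own statement) =====
-- stated objective: faster
-- what changed: B replaces A's two-phase design (build a list of all words via a char accumulator, then scan that list comparing each word's first and last character) with a single streaming pass that keeps only the current word's first and last character and counts matches on the fly, using O(1) extra space instead of materialising words.
import Mathlib
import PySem

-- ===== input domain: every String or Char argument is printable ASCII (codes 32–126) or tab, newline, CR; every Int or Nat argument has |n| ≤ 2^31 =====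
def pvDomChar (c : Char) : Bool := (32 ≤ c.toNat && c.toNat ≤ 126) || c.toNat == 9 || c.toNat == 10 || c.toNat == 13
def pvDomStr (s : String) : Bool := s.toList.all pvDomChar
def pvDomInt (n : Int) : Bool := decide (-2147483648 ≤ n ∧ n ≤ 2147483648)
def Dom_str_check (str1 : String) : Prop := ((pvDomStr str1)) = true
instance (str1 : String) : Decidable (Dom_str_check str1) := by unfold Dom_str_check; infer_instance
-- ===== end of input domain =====

-- B counts words with equal first/last letter in one streaming pass keeping only (first,last) of the
-- current word, instead of A's materialised word list plus a second counting scan (alternative, O(1) space).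

-- ===== PORT A =====
def pvSeps : List Char := [',', '.', '!', '?', ' ']

def str_check (str1 : String) : Int :=
  let s := PySem.Str.lower str1
  let st := s.toList.foldl
    (fun (acc : List (List Char) × List Char) ch =>
      if ch ∉ pvSeps then (acc.1, acc.2 ++ [ch])
      else if acc.2 = [] then acc
      else (acc.1 ++ [acc.2], []))
    ([], [])
  let words := if st.2 ≠ [] then st.1 ++ [st.2] else st.1
  words.foldl
    (fun (count : Int) w =>
      if PySem.List.pyGet? w 0 = PySem.List.pyGet? w ((w.length : Int) - 1)
      then count + 1 else count) 0

-- ===== PORT B =====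
def str_check_alt (str1 : String) : Int :=
  let st := (PySem.Str.lower str1).toList.foldl
    (fun (acc : Int × Option (Char × Char)) ch =>
      if ch ∈ ",.!? ".toList then
        match acc.2 with
        | none => acc
        | some fl => ((if fl.1 = fl.2 then acc.1 + 1 else acc.1), none)
      else
        match acc.2 with
        | none => (acc.1, some (ch, ch))
        | some fl => (acc.1, some (fl.1, ch)))
    (0, none)
  match st.2 with
  | none => st.1
  | some fl => if fl.1 = fl.2 then st.1 + 1 else st.1

-- ===== PRECONDITION & SPEC =====
def Spec_str_check (str1 : String) (out : Int) : Prop := out = str_check_alt str1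
instance (str1 : String) (out : Int) : Decidable (Spec_str_check str1 out) := by unfold Spec_str_check; infer_instance

-- ===== CLAIM (what is proved, stated in full; the proofs are below) =====
def Claim_equal_str_check : Prop := ∀ (str1 : String), Dom_str_check str1 → Spec_str_check str1 (str_check str1)

-- ===== LEMMAS AND PROOFS =====

/-- A's per-character step. -/
def pvStepA (acc : List (List Char) × List Char) (ch : Char) : List (List Char) × List Char :=
  if ch ∉ pvSeps then (acc.1, acc.2 ++ [ch])
  else if acc.2 = [] then acc
  else (acc.1 ++ [acc.2], [])

/-- B's per-character step. -/
def pvStepB (acc : Int × Option (Char × Char)) (ch : Char) : Int × Option (Char × Char) :=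
  if ch ∈ ",.!? ".toList then
    match acc.2 with
    | none => acc
    | some fl => ((if fl.1 = fl.2 then acc.1 + 1 else acc.1), none)
  else
    match acc.2 with
    | none => (acc.1, some (ch, ch))
    | some fl => (acc.1, some (fl.1, ch))

/-- A's counting step over a finished word. -/
def pvCntStep (count : Int) (w : List Char) : Int :=
  if PySem.List.pyGet? w 0 = PySem.List.pyGet? w ((w.length : Int) - 1) then count + 1 else count

def pvCnt (ws : List (List Char)) : Int := ws.foldl pvCntStep 0

/-- first/last characters of the pending word, as B tracks them. -/
def pvFl (t : List Char) : Option (Char × Char) :=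
  match t.head?, t.getLast? with
  | some f, some l => some (f, l)
  | _, _ => none

theorem pvCnt_append_singleton (ws : List (List Char)) (w : List Char) :
    pvCnt (ws ++ [w]) = pvCntStep (pvCnt ws) w := by
  simp [pvCnt, List.foldl_append]

theorem pvLast_exists (c : Char) (cs : List Char) : ∃ l, (c :: cs).getLast? = some l :=
  Option.isSome_iff_exists.mp (by simp [List.getLast?_isSome])

theorem pvFl_cons (c : Char) (cs : List Char) (l : Char) (hl : (c :: cs).getLast? = some l) :
    pvFl (c :: cs) = some (c, l) := by simp [pvFl, hl]

theorem pvCntStep_cons (count : Int) (c : Char) (cs : List Char) (l : Char)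
    (hl : (c :: cs).getLast? = some l) :
    pvCntStep count (c :: cs) = if c = l then count + 1 else count := by
  unfold pvCntStep
  have h1 : PySem.List.pyGet? (c :: cs) (((c :: cs).length : Int) - 1) = some l := by
    have e : ((c :: cs).length : Int) - 1 = ((cs.length : Nat) : Int) := by simp
    rw [e, PySem.List.pyGet?_natCast]
    rw [List.getLast?_eq_getElem?] at hl
    simpa using hl
  rw [h1, PySem.List.pyGet?_zero_cons]
  simp

theorem pvSeps_toList : (",.!? ").toList = pvSeps := by decide

/-- one step of B simulates one step of A through the abstraction (pvCnt, pvFl). -/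
theorem pvStep_comm (ws : List (List Char)) (t : List Char) (ch : Char) :
    pvStepB (pvCnt ws, pvFl t) ch =
      (pvCnt (pvStepA (ws, t) ch).1, pvFl (pvStepA (ws, t) ch).2) := by
  unfold pvStepA pvStepB
  rw [pvSeps_toList]
  by_cases hs : ch ∈ pvSeps
  · cases t with
    | nil => simp [hs, pvFl]
    | cons c cs =>
      obtain ⟨l, hl⟩ := pvLast_exists c cs
      rw [pvFl_cons c cs l hl]
      simp only [hs, not_true_eq_false, if_false, if_true, if_neg (by simp : ¬ (c :: cs = []))]
      rw [pvCnt_append_singleton, pvCntStep_cons _ c cs l hl]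
      simp [pvFl]
  · cases t with
    | nil => simp [hs, pvFl]
    | cons c cs =>
      obtain ⟨l, hl⟩ := pvLast_exists c cs
      rw [pvFl_cons c cs l hl]
      have hcat : (c :: (cs ++ [ch])).getLast? = some ch := by
        rw [← List.cons_append, List.getLast?_concat]
      simp [hs, pvFl, hcat]

theorem pvFold_comm (l : List Char) (ws : List (List Char)) (t : List Char) :
    l.foldl pvStepB (pvCnt ws, pvFl t) =
      (pvCnt (l.foldl pvStepA (ws, t)).1, pvFl (l.foldl pvStepA (ws, t)).2) := by
  induction l generalizing ws t with
  | nil => simp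
  | cons ch l ih =>
    simp only [List.foldl_cons]
    rw [pvStep_comm]
    have := ih (pvStepA (ws, t) ch).1 (pvStepA (ws, t) ch).2
    simpa using this

theorem pv_main (l : List Char) :
    (let st := l.foldl pvStepA ([], []);
     (if st.2 ≠ [] then st.1 ++ [st.2] else st.1).foldl pvCntStep 0) =
    (let st := l.foldl pvStepB (0, none);
     match st.2 with
     | none => st.1
     | some fl => if fl.1 = fl.2 then st.1 + 1 else st.1) := by
  have h0 : (pvCnt [], pvFl []) = ((0 : Int), (none : Option (Char × Char))) := by
    simp [pvCnt, pvFl]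
  have h := pvFold_comm l [] []
  rw [h0] at h
  simp only [h]
  obtain ⟨ws, t⟩ := l.foldl pvStepA ([], [])
  cases t with
  | nil => simp [pvFl, pvCnt]
  | cons c cs =>
    obtain ⟨l', hl⟩ := pvLast_exists c cs
    rw [pvFl_cons c cs l' hl]
    simp only [ne_eq, reduceCtorEq, not_false_eq_true, if_true]
    have e : List.foldl pvCntStep 0 (ws ++ [c :: cs]) = pvCnt (ws ++ [c :: cs]) := rfl
    rw [e, pvCnt_append_singleton, pvCntStep_cons _ c cs l' hl]

-- ===== VERDICT (by name: the statement is the Claim_ definition above) =====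
theorem str_check_spec : Claim_equal_str_check := by
  intro str1 _
  unfold Spec_str_check str_check str_check_alt
  exact pv_main (PySem.Str.lower str1).toList
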